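-- pv_equiv track=rewrite | github.com/pypi-data/pypi-mirror-403 | packages/glaip-sdk/glaip_sdk-0.7.26-py3-none-any.whl/glaip_sdk/cli/slash/tui/keybind_registry.py | _normalize_chord
-- ===== SOURCE A (Python) =====
-- _MODIFIER_ORDER = ("ctrl", "alt", "shift", "meta")
--
-- _MODIFIER_SYNONYMS = {
--     "control": "ctrl",
--     "ctl": "ctrl",
--     "cmd": "meta",
--     "command": "meta",
--     "option": "alt",
--     "return": "enter",
-- }
--
-- _KEY_SYNONYMS = {
--     "esc": "escape",
-- }
--
-- def _normalize_chord(chord: str) -> str: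
--     """Normalize a key chord string to canonical form.
--
--     Normalization rules:
--     - Converts separators: both '-' and '+' are normalized to '+'
--     - Handles synonyms: 'control'/'ctl' -> 'ctrl', 'cmd'/'command' -> 'meta', 'option' -> 'alt'
--     - Deduplicates modifiers: 'ctrl+ctrl+l' -> 'ctrl+l'
--     - Orders modifiers: ctrl < alt < shift < meta (unknown modifiers sort last)
--     - Case-insensitive: 'Ctrl+L' == 'ctrl+l' == 'CTRL-L'
--
--     Args:
--         chord: Key chord string (e.g., "Ctrl+L", "ctrl-l", "CTRL+CTRL+L")
--
--     Returns:
--         Normalized chord string (e.g., "ctrl+l") or empty string if invalid.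
--     """
--     parts = [part for part in chord.replace("-", "+").split("+") if part.strip()]
--     if not parts:
--         return ""
--
--     normalized_parts = [_normalize_key_part(part) for part in parts]
--     if len(normalized_parts) == 1:
--         return normalized_parts[0]
--
--     modifiers, key = normalized_parts[:-1], normalized_parts[-1]
--
--     seen: set[str] = set()
--     unique_mods: list[str] = []
--     for mod in modifiers:
--         if mod in seen:
--             continue
--         seen.add(mod)
--         unique_mods.append(mod)
--
--     unique_mods.sort(key=_modifier_sort_key)
--     return "+".join([*unique_mods, key])
--
-- def _normalize_key_part(part: str) -> str:
--     token = part.strip().lower()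
--     token = _MODIFIER_SYNONYMS.get(token, token)
--     return _KEY_SYNONYMS.get(token, token)
--
-- def _modifier_sort_key(modifier: str) -> int:
--     try:
--         return _MODIFIER_ORDER.index(modifier)
--     except ValueError:
--         return len(_MODIFIER_ORDER)
-- ===== SOURCE B (Python) =====
-- _MODIFIER_ORDER = ("ctrl", "alt", "shift", "meta")
--
-- _MODIFIER_SYNONYMS = {
--     "control": "ctrl",
--     "ctl": "ctrl",
--     "cmd": "meta",
--     "command": "meta",
--     "option": "alt",
--     "return": "enter",
-- }
--
-- _KEY_SYNONYMS = {
--     "esc": "escape",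
-- }
--
--
-- def _normalize_key_token(part):
--     token = part.strip().lower()
--     token = _MODIFIER_SYNONYMS.get(token, token)
--     return _KEY_SYNONYMS.get(token, token)
--
--
-- def _normalize_chord(chord: str) -> str:
--     tokens = [_normalize_key_token(p) for p in chord.replace("-", "+").split("+") if p.strip()]
--     if not tokens:
--         return ""
--     if len(tokens) == 1:
--         return tokens[0]
--     mods, key = tokens[:-1], tokens[-1]
--     known = [m for m in _MODIFIER_ORDER if m in mods]
--     unknown = [m for m in dict.fromkeys(mods) if m not in _MODIFIER_ORDER]
--     return "+".join(known + unknown + [key])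
-- ===== Notes on version B (the rewrite author's own statement) =====
-- stated objective: simpler
-- what changed: Replaces A's manual seen-set dedup loop followed by a stable keyed sort of the modifiers with a table-driven partition: known modifiers are picked directly off the fixed _MODIFIER_ORDER table and unknown ones are deduplicated in first-seen order via dict.fromkeys, so no sort is needed.
import Mathlib
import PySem

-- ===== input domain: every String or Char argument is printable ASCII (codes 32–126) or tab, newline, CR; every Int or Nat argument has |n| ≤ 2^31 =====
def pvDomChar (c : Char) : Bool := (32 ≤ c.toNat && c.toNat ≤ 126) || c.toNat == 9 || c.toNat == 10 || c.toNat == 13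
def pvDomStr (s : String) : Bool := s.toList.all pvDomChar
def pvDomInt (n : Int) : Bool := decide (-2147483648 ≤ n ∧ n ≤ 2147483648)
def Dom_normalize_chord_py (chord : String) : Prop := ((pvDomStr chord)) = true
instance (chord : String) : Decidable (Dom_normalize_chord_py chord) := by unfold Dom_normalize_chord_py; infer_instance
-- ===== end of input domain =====

-- B replaces A's manual seen-set dedup loop + stable keyed sort of the modifiers by a
-- table-driven partition (known modifiers picked off the fixed order table, unknown ones
-- deduplicated in first-seen order); objective: simpler.

-- ===== PORT A =====
def pvModOrder : List String := ["ctrl", "alt", "shift", "meta"]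

def pvModSynonyms : PySem.Dict String String :=
  PySem.Dict.mk [("control", "ctrl"), ("ctl", "ctrl"), ("cmd", "meta"), ("command", "meta"),
   ("option", "alt"), ("return", "enter")]

def pvKeySynonyms : PySem.Dict String String := PySem.Dict.mk [("esc", "escape")]

def normalize_key_part (part : String) : String :=
  let token := PySem.Str.lower (PySem.Str.strip part)
  let token := PySem.Dict.getD pvModSynonyms token token
  PySem.Dict.getD pvKeySynonyms token token

-- _MODIFIER_ORDER.index with ValueError fallback len(_MODIFIER_ORDER) = 4
def modifier_sort_key (modifier : String) : Int :=
  match PySem.List.index? pvModOrder modifier with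
  | some k => (k : Int)
  | none => 4

def normalize_chord_py (chord : String) : String :=
  let parts := ((PySem.Str.split? (PySem.Str.replace chord "-" "+") "+").getD []).filter
    (fun p => !(PySem.Str.strip p == ""))
  if parts.isEmpty then ""
  else
    let normalized := parts.map normalize_key_part
    if normalized.length == 1 then normalized.headI
    else
      let modifiers := normalized.dropLast
      let key := normalized.getLastD ""
      -- the seen-set / unique-list loop
      let st := modifiers.foldl
        (fun (st : PySem.Set String × List String) mod =>
          if PySem.Set.contains st.1 mod then st else (PySem.Set.add st.1 mod, st.2 ++ [mod]))
        (PySem.Set.empty, [])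
      let uniqueMods := PySem.List.sorted st.2 modifier_sort_key false
      PySem.Str.join "+" (uniqueMods ++ [key])

-- ===== PORT B =====
def normalize_key_token (part : String) : String :=
  let token := PySem.Str.lower (PySem.Str.strip part)
  let token := PySem.Dict.getD pvModSynonyms token token
  PySem.Dict.getD pvKeySynonyms token token

def normalize_chord_py_alt (chord : String) : String :=
  let tokens := (((PySem.Str.split? (PySem.Str.replace chord "-" "+") "+").getD []).filter
    (fun p => !(PySem.Str.strip p == ""))).map normalize_key_token
  if tokens.isEmpty then ""
  else if tokens.length == 1 then tokens.headI
  else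
    let mods := tokens.dropLast
    let key := tokens.getLastD ""
    let known := pvModOrder.filter (fun m => mods.contains m)
    let unknown := (PySem.List.dedup mods).filter (fun m => !pvModOrder.contains m)
    PySem.Str.join "+" (known ++ unknown ++ [key])

-- ===== PRECONDITION & SPEC =====
def Spec_normalize_chord_py (chord : String) (out : String) : Prop := out = normalize_chord_py_alt chord
instance (chord : String) (out : String) : Decidable (Spec_normalize_chord_py chord out) := by unfold Spec_normalize_chord_py; infer_instance

-- ===== CLAIM (what is proved, stated in full; the proofs are below) =====
def Claim_equal_normalize_chord_py : Prop := ∀ (chord : String), Dom_normalize_chord_py chord → Spec_normalize_chord_py chord (normalize_chord_py chord)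

-- ===== LEMMAS AND PROOFS =====

-- A's sort key, in explicit branch form
theorem key_spec (m : String) :
    modifier_sort_key m =
      if m = "ctrl" then 0 else if m = "alt" then 1 else if m = "shift" then 2
      else if m = "meta" then 3 else 4 := by
  simp only [modifier_sort_key, PySem.List.index?_eq_idxOf?, pvModOrder, List.idxOf?_cons,
    List.idxOf?_nil, beq_iff_eq]
  by_cases h0 : m = "ctrl" <;> by_cases h1 : m = "alt" <;> by_cases h2 : m = "shift" <;>
    by_cases h3 : m = "meta" <;> simp_all [eq_comm]

-- the five key buckets of a list, in key order
def pvBuckets (l : List String) : List String :=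
  l.filter (fun m => modifier_sort_key m == 0) ++ l.filter (fun m => modifier_sort_key m == 1) ++
  l.filter (fun m => modifier_sort_key m == 2) ++ l.filter (fun m => modifier_sort_key m == 3) ++
  l.filter (fun m => modifier_sort_key m == 4)

theorem key_range (m : String) : modifier_sort_key m = 0 ∨ modifier_sort_key m = 1 ∨
    modifier_sort_key m = 2 ∨ modifier_sort_key m = 3 ∨ modifier_sort_key m = 4 := by
  rw [key_spec]; split_ifs <;> simp

theorem insertBy_middle (x : String) (A B : List String)
    (hA : ∀ a ∈ A, ¬ modifier_sort_key x < modifier_sort_key a)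
    (hB : ∀ b ∈ B, modifier_sort_key x < modifier_sort_key b) :
    PySem.List.insertBy (fun a b => decide (modifier_sort_key a < modifier_sort_key b)) x (A ++ B)
      = A ++ x :: B := by
  induction A with
  | nil =>
    cases B with
    | nil => rfl
    | cons b bs =>
      simp [PySem.List.insertBy, hB b (by simp)]
  | cons a as ih =>
    have := hA a (by simp)
    simp only [List.cons_append, PySem.List.insertBy, decide_eq_true_eq]
    rw [if_neg this]
    simp [ih (fun a ha => hA a (by simp [ha]))]

theorem insert_buckets (p : List String) (x : String) :
    PySem.List.insertBy (fun a b => decide (modifier_sort_key a < modifier_sort_key b)) x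
      (pvBuckets p) = pvBuckets (p ++ [x]) := by
  rcases key_range x with hk | hk | hk | hk | hk
  · have hA : ∀ a ∈ (p.filter (fun m => modifier_sort_key m == 0)), ¬ modifier_sort_key x < modifier_sort_key a := by
      intro a ha
      simp only [List.append_assoc, List.mem_append, List.mem_filter, beq_iff_eq] at ha
      rcases ha with ⟨-, h⟩ <;> omega
    have hB : ∀ b ∈ (p.filter (fun m => modifier_sort_key m == 1) ++ p.filter (fun m => modifier_sort_key m == 2) ++ p.filter (fun m => modifier_sort_key m == 3) ++ p.filter (fun m => modifier_sort_key m == 4)), modifier_sort_key x < modifier_sort_key b := by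
      intro b hb
      simp only [List.append_assoc, List.mem_append, List.mem_filter, beq_iff_eq] at hb
      rcases hb with ⟨-, h⟩ | ⟨-, h⟩ | ⟨-, h⟩ | ⟨-, h⟩ <;> omega
    rw [show pvBuckets p = (p.filter (fun m => modifier_sort_key m == 0)) ++ (p.filter (fun m => modifier_sort_key m == 1) ++ p.filter (fun m => modifier_sort_key m == 2) ++ p.filter (fun m => modifier_sort_key m == 3) ++ p.filter (fun m => modifier_sort_key m == 4)) from by simp [pvBuckets, List.append_assoc]]
    rw [insertBy_middle x _ _ hA hB]
    simp [pvBuckets, List.filter_append, hk, List.append_assoc]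
  · have hA : ∀ a ∈ (p.filter (fun m => modifier_sort_key m == 0) ++ p.filter (fun m => modifier_sort_key m == 1)), ¬ modifier_sort_key x < modifier_sort_key a := by
      intro a ha
      simp only [List.append_assoc, List.mem_append, List.mem_filter, beq_iff_eq] at ha
      rcases ha with ⟨-, h⟩ | ⟨-, h⟩ <;> omega
    have hB : ∀ b ∈ (p.filter (fun m => modifier_sort_key m == 2) ++ p.filter (fun m => modifier_sort_key m == 3) ++ p.filter (fun m => modifier_sort_key m == 4)), modifier_sort_key x < modifier_sort_key b := by
      intro b hb
      simp only [List.append_assoc, List.mem_append, List.mem_filter, beq_iff_eq] at hb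
      rcases hb with ⟨-, h⟩ | ⟨-, h⟩ | ⟨-, h⟩ <;> omega
    rw [show pvBuckets p = (p.filter (fun m => modifier_sort_key m == 0) ++ p.filter (fun m => modifier_sort_key m == 1)) ++ (p.filter (fun m => modifier_sort_key m == 2) ++ p.filter (fun m => modifier_sort_key m == 3) ++ p.filter (fun m => modifier_sort_key m == 4)) from by simp [pvBuckets, List.append_assoc]]
    rw [insertBy_middle x _ _ hA hB]
    simp [pvBuckets, List.filter_append, hk, List.append_assoc]
  · have hA : ∀ a ∈ (p.filter (fun m => modifier_sort_key m == 0) ++ p.filter (fun m => modifier_sort_key m == 1) ++ p.filter (fun m => modifier_sort_key m == 2)), ¬ modifier_sort_key x < modifier_sort_key a := by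
      intro a ha
      simp only [List.append_assoc, List.mem_append, List.mem_filter, beq_iff_eq] at ha
      rcases ha with ⟨-, h⟩ | ⟨-, h⟩ | ⟨-, h⟩ <;> omega
    have hB : ∀ b ∈ (p.filter (fun m => modifier_sort_key m == 3) ++ p.filter (fun m => modifier_sort_key m == 4)), modifier_sort_key x < modifier_sort_key b := by
      intro b hb
      simp only [List.append_assoc, List.mem_append, List.mem_filter, beq_iff_eq] at hb
      rcases hb with ⟨-, h⟩ | ⟨-, h⟩ <;> omega
    rw [show pvBuckets p = (p.filter (fun m => modifier_sort_key m == 0) ++ p.filter (fun m => modifier_sort_key m == 1) ++ p.filter (fun m => modifier_sort_key m == 2)) ++ (p.filter (fun m => modifier_sort_key m == 3) ++ p.filter (fun m => modifier_sort_key m == 4)) from by simp [pvBuckets, List.append_assoc]]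
    rw [insertBy_middle x _ _ hA hB]
    simp [pvBuckets, List.filter_append, hk, List.append_assoc]
  · have hA : ∀ a ∈ (p.filter (fun m => modifier_sort_key m == 0) ++ p.filter (fun m => modifier_sort_key m == 1) ++ p.filter (fun m => modifier_sort_key m == 2) ++ p.filter (fun m => modifier_sort_key m == 3)), ¬ modifier_sort_key x < modifier_sort_key a := by
      intro a ha
      simp only [List.append_assoc, List.mem_append, List.mem_filter, beq_iff_eq] at ha
      rcases ha with ⟨-, h⟩ | ⟨-, h⟩ | ⟨-, h⟩ | ⟨-, h⟩ <;> omega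
    have hB : ∀ b ∈ (p.filter (fun m => modifier_sort_key m == 4)), modifier_sort_key x < modifier_sort_key b := by
      intro b hb
      simp only [List.append_assoc, List.mem_append, List.mem_filter, beq_iff_eq] at hb
      rcases hb with ⟨-, h⟩ <;> omega
    rw [show pvBuckets p = (p.filter (fun m => modifier_sort_key m == 0) ++ p.filter (fun m => modifier_sort_key m == 1) ++ p.filter (fun m => modifier_sort_key m == 2) ++ p.filter (fun m => modifier_sort_key m == 3)) ++ (p.filter (fun m => modifier_sort_key m == 4)) from by simp [pvBuckets, List.append_assoc]]
    rw [insertBy_middle x _ _ hA hB]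
    simp [pvBuckets, List.filter_append, hk, List.append_assoc]
  · have hA : ∀ a ∈ (p.filter (fun m => modifier_sort_key m == 0) ++ p.filter (fun m => modifier_sort_key m == 1) ++ p.filter (fun m => modifier_sort_key m == 2) ++ p.filter (fun m => modifier_sort_key m == 3) ++ p.filter (fun m => modifier_sort_key m == 4)), ¬ modifier_sort_key x < modifier_sort_key a := by
      intro a ha
      simp only [List.append_assoc, List.mem_append, List.mem_filter, beq_iff_eq] at ha
      rcases ha with ⟨-, h⟩ | ⟨-, h⟩ | ⟨-, h⟩ | ⟨-, h⟩ | ⟨-, h⟩ <;> omega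
    have hB : ∀ b ∈ ([] : List String), modifier_sort_key x < modifier_sort_key b := by
      intro b hb
      simp at hb
    rw [show pvBuckets p = (p.filter (fun m => modifier_sort_key m == 0) ++ p.filter (fun m => modifier_sort_key m == 1) ++ p.filter (fun m => modifier_sort_key m == 2) ++ p.filter (fun m => modifier_sort_key m == 3) ++ p.filter (fun m => modifier_sort_key m == 4)) ++ ([] : List String) from by simp [pvBuckets, List.append_assoc]]
    rw [insertBy_middle x _ _ hA hB]
    simp [pvBuckets, List.filter_append, hk, List.append_assoc]

theorem sorted_eq_buckets (l : List String) :
    PySem.List.sorted l modifier_sort_key false = pvBuckets l := by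
  rw [PySem.List.sorted_eq_foldl_insertBy]
  suffices h : ∀ (l p : List String),
      l.foldl (fun acc x => PySem.List.insertBy
        (fun a b => decide (modifier_sort_key a < modifier_sort_key b)) x acc) (pvBuckets p)
      = pvBuckets (p ++ l) by
    simpa using h l []
  intro l
  induction l with
  | nil => simp
  | cons x xs ih =>
    intro p
    simp only [List.foldl_cons, insert_buckets]
    rw [ih (p ++ [x])]
    simp

-- A's dedup loop computes PySem.Set.ofList (= PySem.List.dedup)
theorem dedup_loop (l : List String) :
    (l.foldl (fun (st : PySem.Set String × List String) mod =>
        if PySem.Set.contains st.1 mod then st else (PySem.Set.add st.1 mod, st.2 ++ [mod]))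
      (PySem.Set.empty, [])).2 = PySem.List.dedup l := by
  rw [PySem.List.dedup_eq_ofList]
  suffices h : ∀ (l : List String) (s : PySem.Set String),
      (l.foldl (fun (st : PySem.Set String × List String) mod =>
        if PySem.Set.contains st.1 mod then st else (PySem.Set.add st.1 mod, st.2 ++ [mod])) (s, s)).2
      = l.foldl PySem.Set.add s by
    rw [PySem.Set.ofList_eq_foldl]
    exact h l PySem.Set.empty
  intro l
  induction l with
  | nil => intro s; rfl
  | cons x xs ih =>
    intro s
    simp only [List.foldl_cons]
    by_cases hx : PySem.Set.contains s x = true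
    · have hx' : x ∈ s := by simpa using hx
      have hadd : PySem.Set.add s x = s := by
        simp [PySem.Set.add, hx']
      rw [if_pos hx, hadd]
      exact ih s
    · have hx' : ¬ x ∈ s := by simpa using hx
      have hadd : PySem.Set.add s x = s ++ [x] := by
        simp [PySem.Set.add, hx']
      rw [if_neg hx, hadd]
      exact ih (s ++ [x])

-- on a duplicate-free list the key buckets are the table-driven partition
theorem filter_eq_of_nodup (l : List String) (hl : l.Nodup) (c : String) :
    l.filter (fun m => decide (m = c)) = if c ∈ l then [c] else [] := by
  induction l with
  | nil => simp
  | cons x xs ih =>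
    simp only [List.nodup_cons] at hl
    by_cases hx : x = c
    · subst hx
      simp [hl.1, ih hl.2]
    · simp [hx, ih hl.2, Ne.symm hx]

theorem buckets_eq_partition (l : List String) (hl : l.Nodup) :
    pvBuckets l = List.filter (fun m => decide (m ∈ l)) pvModOrder
      ++ List.filter (fun m => !decide (m ∈ pvModOrder)) l := by
  have e0 : l.filter (fun m => modifier_sort_key m == 0) = l.filter (fun m => decide (m = "ctrl")) := by
    apply List.filter_congr; intro m _; rw [key_spec]; split_ifs <;> simp_all
  have e1 : l.filter (fun m => modifier_sort_key m == 1) = l.filter (fun m => decide (m = "alt")) := by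
    apply List.filter_congr; intro m _; rw [key_spec]; split_ifs <;> simp_all
  have e2 : l.filter (fun m => modifier_sort_key m == 2) = l.filter (fun m => decide (m = "shift")) := by
    apply List.filter_congr; intro m _; rw [key_spec]; split_ifs <;> simp_all
  have e3 : l.filter (fun m => modifier_sort_key m == 3) = l.filter (fun m => decide (m = "meta")) := by
    apply List.filter_congr; intro m _; rw [key_spec]; split_ifs <;> simp_all
  have e4 : l.filter (fun m => modifier_sort_key m == 4) = l.filter (fun m => !decide (m ∈ pvModOrder)) := by
    apply List.filter_congr; intro m _; rw [key_spec]
    split_ifs <;> simp_all [pvModOrder]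
  unfold pvBuckets
  rw [e0, e1, e2, e3, e4, filter_eq_of_nodup l hl, filter_eq_of_nodup l hl,
    filter_eq_of_nodup l hl, filter_eq_of_nodup l hl]
  simp only [pvModOrder, List.filter_cons, List.filter_nil]
  by_cases h0 : "ctrl" ∈ l <;> by_cases h1 : "alt" ∈ l <;> by_cases h2 : "shift" ∈ l <;>
    by_cases h3 : "meta" ∈ l <;> simp [h0, h1, h2, h3]

theorem core (mods : List String) :
    PySem.List.sorted
      ((mods.foldl (fun (st : PySem.Set String × List String) mod =>
          if PySem.Set.contains st.1 mod then st else (PySem.Set.add st.1 mod, st.2 ++ [mod]))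
        (PySem.Set.empty, [])).2) modifier_sort_key false
    = pvModOrder.filter (fun m => mods.contains m)
      ++ (PySem.List.dedup mods).filter (fun m => !pvModOrder.contains m) := by
  rw [dedup_loop, sorted_eq_buckets,
    buckets_eq_partition _ (by simpa using PySem.Set.nodup_ofList mods)]
  congr 1
  · apply List.filter_congr
    intro m _
    simp [PySem.List.mem_dedup]
  · apply List.filter_congr
    intro m _
    simp

-- ===== VERDICT (by name: the statement is the Claim_ definition above) =====
theorem normalize_chord_py_spec : Claim_equal_normalize_chord_py := by
  intro chord _
  unfold Spec_normalize_chord_py normalize_chord_py normalize_chord_py_alt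
  simp only [show normalize_key_token = normalize_key_part from rfl]
  generalize (((PySem.Str.split? (PySem.Str.replace chord "-" "+") "+").getD []).filter
    (fun p => !(PySem.Str.strip p == ""))) = parts
  by_cases he : parts.isEmpty = true
  · simp [he]
  · have he' : ¬ ((parts.map normalize_key_part).isEmpty = true) := by
      simpa using he
    simp only [he, he', if_false, Bool.false_eq_true]
    by_cases h1 : (((parts.map normalize_key_part).length == 1) = true)
    · rw [if_pos h1, if_pos h1]
    · rw [if_neg h1, if_neg h1, core]
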